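-- pv_equiv track=rewrite | github.com/yongunt/problems | mtg_mana_cost/main.py | can_pay_cost
-- ===== SOURCE A (Python) =====
-- MAGES:tuple = ("W", "U", "B", "R", "G", "C")
--
-- def can_pay_cost(player_mana:str, mana_cost:str) -> bool:
--     player_mages:dict = {}
--     player_addiction:int = 0
--     cost_mages:dict = {}
--     cost_addiction:int = 0
--
--     for mage in player_mana:
--         if mage in MAGES: player_mages[mage] = player_mana.count(mage)
--         elif mage.isdigit(): player_addiction = int(mage)
--
--     for mage in mana_cost:
--         if mage in MAGES: cost_mages[mage] = mana_cost.count(mage)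
--         elif mage.isdigit(): cost_addiction = int(mage)
--
--     for mage in cost_mages:
--         if mage not in player_mages: return False
--         player_mages[mage] -= cost_mages[mage]
--         if player_mages[mage] < 0: return False
--
--     for mage in player_mages: player_addiction += player_mages[mage]
--
--     if (player_addiction - cost_addiction) < 0: return False
--     else: return True
-- ===== SOURCE B (Python) =====
-- MAGES: tuple = ("W", "U", "B", "R", "G", "C")
--
-- def can_pay_cost(player_mana: str, mana_cost: str) -> bool:
--     # Simulate the payment: pour the player's colored symbols into a pool,
--     # consume one pool symbol per colored cost symbol, pay generic with what is left.
--     pool = [ch for ch in player_mana if ch in MAGES]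
--     generic = 0
--     for ch in player_mana:
--         if ch.isdigit():
--             generic = int(ch)
--     need = 0
--     for ch in mana_cost:
--         if ch in MAGES:
--             try:
--                 pool.remove(ch)
--             except ValueError:
--                 return False
--         elif ch.isdigit():
--             need = int(ch)
--     return generic + len(pool) >= need
-- ===== Notes on version B (the rewrite author's own statement) =====
-- stated objective: alternative
-- what changed: B replaces A's count-based dicts and subtraction/leftover loops with a direct payment simulation: it pours the player's colored symbols into a pool list, consumes one pool element per colored cost symbol as it scans the cost once (failing on a missing symbol), and pays the generic part with the leftover pool size, whereas A counts every symbol with str.count into two dicts and compares the counts.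
import Mathlib
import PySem

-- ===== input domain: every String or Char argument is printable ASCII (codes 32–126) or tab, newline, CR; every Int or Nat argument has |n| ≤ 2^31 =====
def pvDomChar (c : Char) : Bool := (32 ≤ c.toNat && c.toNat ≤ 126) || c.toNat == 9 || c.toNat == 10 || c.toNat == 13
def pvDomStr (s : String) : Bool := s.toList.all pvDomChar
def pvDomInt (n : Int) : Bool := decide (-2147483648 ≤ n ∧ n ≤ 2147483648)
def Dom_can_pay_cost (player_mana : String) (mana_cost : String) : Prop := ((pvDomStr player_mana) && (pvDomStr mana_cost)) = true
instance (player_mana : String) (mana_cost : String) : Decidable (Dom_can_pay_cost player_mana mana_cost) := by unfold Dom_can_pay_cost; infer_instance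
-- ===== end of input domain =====

-- B replaces A's count-into-dicts / subtract / leftover-sum passes by a direct payment
-- simulation: a pool of the player's colored symbols is consumed one element per colored
-- cost symbol, and the generic part is paid from the leftover pool (objective: alternative).

-- ===== PORT A =====
def pvMAGES : List Char := ['W', 'U', 'B', 'R', 'G', 'C']

-- int(mage) for a single digit character '0'..'9' (exact there: value = code - 48)
def pvDigitVal (c : Char) : Int := (c.toNat : Int) - 48

-- A's first two loops are the same loop body run on the two strings; one helper, used twice.
-- `mage in MAGES` on a 1-char string = char membership; `s.count(mage)` for a 1-char `mage` = char count.
def pvScan (s : List Char) : PySem.Dict Char Int × Int :=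
  s.foldl (fun st mage =>
    if mage ∈ pvMAGES then (st.1.insert mage ((PySem.List.count s mage : Int)), st.2)
    else if PySem.Chars.isdigit mage then (st.1, pvDigitVal mage)
    else st) (PySem.Dict.empty, 0)

-- A's third loop: iterate the cost dict (key with its value = items), early-return False as `none`.
-- `player_mages[mage]` after the in-place `-=` is read back with getD (the key is present).
def pvPayLoop : List (Char × Int) → PySem.Dict Char Int → Option (PySem.Dict Char Int)
  | [], d => some d
  | q :: rest, d =>
    match d.get? q.1 with
    | none => none
    | some pv =>
      let d' := d.insert q.1 (pv - q.2)
      if d'.getD q.1 0 < 0 then none else pvPayLoop rest d'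

def can_pay_cost (player_mana : String) (mana_cost : String) : Bool :=
  let p := pvScan player_mana.toList
  let c := pvScan mana_cost.toList
  match pvPayLoop c.1.items p.1 with
  | none => false
  | some d =>
    -- `for mage in player_mages: player_addiction += player_mages[mage]` = add each item's value
    let pa := d.items.foldl (fun a q => a + q.2) p.2
    if pa - c.2 < 0 then false else true

-- ===== PORT B =====
-- `generic = 0; for ch in s: if ch.isdigit(): generic = int(ch)`
def pvGenericOf (s : List Char) : Int :=
  s.foldl (fun g c => if PySem.Chars.isdigit c then pvDigitVal c else g) 0

-- B's cost loop: consume one pool element per colored symbol (pool.remove, ValueError = none),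
-- overwrite `need` on a digit.
def pvPayRec : List Char → List Char → Int → Option (List Char × Int)
  | [], pool, need => some (pool, need)
  | c :: rest, pool, need =>
    if c ∈ pvMAGES then
      match PySem.List.remove? pool c with
      | none => none
      | some pool' => pvPayRec rest pool' need
    else if PySem.Chars.isdigit c then pvPayRec rest pool (pvDigitVal c)
    else pvPayRec rest pool need

def can_pay_cost_alt (player_mana : String) (mana_cost : String) : Bool :=
  let pool := player_mana.toList.filter (fun c => decide (c ∈ pvMAGES))
  let generic := pvGenericOf player_mana.toList
  match pvPayRec mana_cost.toList pool 0 with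
  | none => false
  | some (pool', need) => decide (generic + (pool'.length : Int) ≥ need)

-- ===== PRECONDITION & SPEC =====
def Spec_can_pay_cost (player_mana : String) (mana_cost : String) (out : Bool) : Prop := out = can_pay_cost_alt player_mana mana_cost
instance (player_mana : String) (mana_cost : String) (out : Bool) : Decidable (Spec_can_pay_cost player_mana mana_cost out) := by unfold Spec_can_pay_cost; infer_instance

-- ===== CLAIM (what is proved, stated in full; the proofs are below) =====
def Claim_equal_can_pay_cost : Prop := ∀ (player_mana : String) (mana_cost : String), Dom_can_pay_cost player_mana mana_cost → Spec_can_pay_cost player_mana mana_cost (can_pay_cost player_mana mana_cost)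

-- ===== LEMMAS AND PROOFS =====

-- last digit of s (as Int), default 0 — the value A's overwrite loop and B's overwrite loop compute
def pvLastDigit (s : List Char) : Int :=
  ((s.reverse.find? PySem.Chars.isdigit).map pvDigitVal).getD 0

-- the common closed form both ports are reduced to
def pvClosed (pm : String) (mc : String) : Bool :=
  if pvMAGES.any (fun m => PySem.List.count mc.toList m > PySem.List.count pm.toList m)
  then false
  else decide (pvLastDigit pm.toList
      + (pvMAGES.map (fun m => (PySem.List.count pm.toList m : Int))).sum
      - (pvMAGES.map (fun m => (PySem.List.count mc.toList m : Int))).sum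
      ≥ pvLastDigit mc.toList)

theorem pv_mages_not_digit (c : Char) (h : c ∈ pvMAGES) : PySem.Chars.isdigit c = false := by
  fin_cases h <;> decide

theorem pvScan_snd_aux (s : List Char) : ∀ (l : List Char) (d : PySem.Dict Char Int) (a : Int),
    (l.foldl (fun st mage =>
      if mage ∈ pvMAGES then (st.1.insert mage ((PySem.List.count s mage : Int)), st.2)
      else if PySem.Chars.isdigit mage then (st.1, pvDigitVal mage)
      else st) (d, a)).2
    = ((l.reverse.find? PySem.Chars.isdigit).map pvDigitVal).getD a := by
  intro l
  induction l with
  | nil => intro d a; simp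
  | cons c l ih =>
    intro d a
    simp only [List.foldl_cons, List.reverse_cons, List.find?_append]
    by_cases hm : c ∈ pvMAGES
    · simp only [hm, if_true, ih]
      cases hf : l.reverse.find? PySem.Chars.isdigit with
      | some x => simp
      | none => simp [pv_mages_not_digit c hm]
    · by_cases hd2 : PySem.Chars.isdigit c = true
      · simp only [hm, if_false, hd2, if_true, ih]
        cases hf : l.reverse.find? PySem.Chars.isdigit with
        | some x => simp
        | none => simp [hd2]
      · simp only [hm, if_false, hd2, ih]
        cases hf : l.reverse.find? PySem.Chars.isdigit with
        | some x => simp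
        | none => simp [hd2]

theorem pvScan_fst_aux (s : List Char) : ∀ (l : List Char) (d : PySem.Dict Char Int) (a : Int),
    (l.foldl (fun st mage =>
      if mage ∈ pvMAGES then (st.1.insert mage ((PySem.List.count s mage : Int)), st.2)
      else if PySem.Chars.isdigit mage then (st.1, pvDigitVal mage)
      else st) (d, a)).1
    = l.foldl (fun d c => if c ∈ pvMAGES then d.insert c ((PySem.List.count s c : Int)) else d) d := by
  intro l
  induction l with
  | nil => intro d a; simp
  | cons c l ih =>
    intro d a
    simp only [List.foldl_cons]
    by_cases hm : c ∈ pvMAGES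
    · rw [if_pos hm, if_pos hm]
      exact ih _ _
    · rw [if_neg hm, if_neg hm]
      by_cases hd2 : PySem.Chars.isdigit c = true
      · rw [if_pos hd2]
        exact ih _ _
      · rw [if_neg hd2]
        exact ih _ _

theorem pv_items_insertg (g : Char → Int) (l : List Char) :
    (l.foldl (fun d c => d.insert c (g c)) PySem.Dict.empty).items
      = (PySem.Set.ofList l).map (fun k => (k, g k)) := by
  induction l using List.reverseRecOn with
  | nil => rfl
  | append_singleton l c ih =>
    rw [List.foldl_append, List.foldl_cons, List.foldl_nil, PySem.Set.ofList_append_singleton]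
    have hkeys : (l.foldl (fun d c => d.insert c (g c)) PySem.Dict.empty).keys
        = PySem.Set.ofList l := by
      rw [show (fun (d : PySem.Dict Char Int) c => d.insert c (g c)) = (fun d c => d.insert c ((fun (_ : PySem.Dict Char Int) c => g c) d c)) from rfl,
        PySem.Dict.keys_foldl_insert]
      simp [PySem.Dict.keys]
      rfl
    by_cases hc : c ∈ l
    · have hcont : (l.foldl (fun d c => d.insert c (g c)) PySem.Dict.empty).contains c = true := by
        rw [PySem.Dict.contains_iff_mem_keys, hkeys]
        exact (PySem.Set.mem_ofList _ _).mpr hc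
      rw [PySem.Dict.items_insert_of_contains _ _ hcont, ih, List.map_map]
      have hadd : (PySem.Set.ofList l).add c = PySem.Set.ofList l := by
        have : c ∈ PySem.Set.ofList l := (PySem.Set.mem_ofList _ _).mpr hc
        simp [PySem.Set.add, PySem.Set.contains, this]
      rw [hadd]
      apply List.map_congr_left
      intro k hk
      by_cases hkc : k = c <;> simp [hkc]
    · have hcont : (l.foldl (fun d c => d.insert c (g c)) PySem.Dict.empty).contains c = false := by
        rw [← Bool.not_eq_true, PySem.Dict.contains_iff_mem_keys, hkeys]
        simpa [PySem.Set.mem_ofList] using hc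
      rw [PySem.Dict.items_insert_of_not_contains _ _ hcont, ih]
      have hadd : (PySem.Set.ofList l).add c = PySem.Set.ofList l ++ [c] := by
        have : ¬ c ∈ PySem.Set.ofList l := by simpa [PySem.Set.mem_ofList] using hc
        simp [PySem.Set.add, PySem.Set.contains, this]
      rw [hadd]
      simp

theorem pvScan_snd (s : List Char) : (pvScan s).2 = pvLastDigit s := by
  rw [pvScan, pvScan_snd_aux s s PySem.Dict.empty 0, pvLastDigit]

theorem pvScan_eq_counter (s : List Char) :
    (pvScan s).1 = PySem.Dict.counter (s.filter (fun c => decide (c ∈ pvMAGES))) := by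
  rw [pvScan, pvScan_fst_aux s s PySem.Dict.empty 0]
  apply PySem.Dict.ext
  rw [PySem.Dict.items_counter]
  have hf : s.foldl (fun d c => if c ∈ pvMAGES then d.insert c ((PySem.List.count s c : Int)) else d) PySem.Dict.empty
      = (s.filter (fun c => decide (c ∈ pvMAGES))).foldl (fun d c => d.insert c ((PySem.List.count s c : Int))) PySem.Dict.empty := by
    rw [List.foldl_filter]
    simp only [decide_eq_true_eq]
  rw [hf, pv_items_insertg]
  apply List.map_congr_left
  intro k hk
  have hk' : k ∈ s.filter (fun c => decide (c ∈ pvMAGES)) := (PySem.Set.mem_ofList _ _).mp hk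
  have hp : decide (k ∈ pvMAGES) = true := (List.mem_filter.mp hk').2
  have hc := List.count_filter (p := fun c => decide (c ∈ pvMAGES)) (a := k) (l := s) hp
  rw [PySem.List.count_eq, hc]

theorem pv_sum_overwrite (its : List (Char × Int)) (k : Char) (pv w : Int)
    (hn : (its.map Prod.fst).Nodup) (hm : (k, pv) ∈ its) :
    ((its.map (fun p => if p.1 == k then (k, w) else p)).map Prod.snd).sum
      = (its.map Prod.snd).sum - pv + w := by
  induction its with
  | nil => simp at hm
  | cons q rest ih =>
    simp only [List.map_cons, List.nodup_cons, List.sum_cons] at hn ⊢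
    rcases List.mem_cons.mp hm with hq | hq
    · subst hq
      simp only [BEq.rfl, if_true]
      have hmap : ∀ p ∈ rest, (if p.1 == k then ((k, w) : Char × Int) else p) = id p := by
        intro p hp
        have : p.1 ≠ k := by
          intro h
          apply hn.1
          rw [← h]
          exact List.mem_map_of_mem (f := Prod.fst) (a := p) hp
        simp [this]
      rw [List.map_congr_left hmap, List.map_id]; ring
    · have hk : k ∈ rest.map Prod.fst := List.mem_map_of_mem (f := Prod.fst) hq
      have hq1 : (q.1 == k) = false := by
        cases h : q.1 == k
        · rfl
        · exact absurd ((beq_iff_eq).mp h ▸ hk) hn.1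
      simp only [hq1, Bool.false_eq_true, if_false]
      rw [ih hn.2 hq]; ring

theorem pv_sum_insert (d : PySem.Dict Char Int) (k : Char) (pv w : Int)
    (hd : d.keys.Nodup) (hg : d.get? k = some pv) :
    ((d.insert k w).items.map Prod.snd).sum = (d.items.map Prod.snd).sum - pv + w := by
  have hcont : d.contains k = true := by rw [PySem.Dict.contains_eq_isSome_get?, hg]; rfl
  rw [PySem.Dict.items_insert_of_contains _ _ hcont]
  exact pv_sum_overwrite d.items k pv w hd (PySem.Dict.mem_items_of_get?_eq_some _ hg)

theorem pvPayLoop_isSome (L : List (Char × Int)) : ∀ (d : PySem.Dict Char Int),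
    (L.map Prod.fst).Nodup → d.keys.Nodup → (∀ q ∈ L, 1 ≤ q.2) →
    ((pvPayLoop L d).isSome ↔ ∀ q ∈ L, q.2 ≤ d.getD q.1 0) := by
  induction L with
  | nil => intro d _ _ _; simp [pvPayLoop]
  | cons q rest ih =>
    intro d hn hd hv
    simp only [List.map_cons, List.nodup_cons] at hn
    cases hg : d.get? q.1 with
    | none =>
      simp only [pvPayLoop, hg]
      constructor
      · intro h; simp at h
      · intro h
        have h1 := h q (List.mem_cons_self)
        have : d.getD q.1 0 = 0 := by simp [PySem.Dict.getD, hg]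
        have h2 := hv q (List.mem_cons_self)
        omega
    | some pv =>
      simp only [pvPayLoop, hg, PySem.Dict.getD_insert_self]
      have hgd : d.getD q.1 0 = pv := by simp [PySem.Dict.getD, hg]
      by_cases hneg : pv - q.2 < 0
      · simp only [hneg, if_true]
        constructor
        · intro h; simp at h
        · intro h; have := h q (List.mem_cons_self); omega
      · simp only [hneg, if_false]
        have hd' : (d.insert q.1 (pv - q.2)).keys.Nodup := PySem.Dict.nodup_keys_insert _ _ _ hd
        rw [ih _ hn.2 hd' (fun r hr => hv r (List.mem_cons_of_mem _ hr))]
        constructor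
        · intro h
          intro r hr
          rcases List.mem_cons.mp hr with h1 | h1
          · subst h1; omega
          · have hne : r.1 ≠ q.1 := fun he => hn.1 (he ▸ List.mem_map_of_mem h1)
            have := h r h1
            rwa [PySem.Dict.getD_insert_of_ne _ _ _ hne] at this
        · intro h r hr
          have hne : r.1 ≠ q.1 := fun he => hn.1 (he ▸ List.mem_map_of_mem hr)
          rw [PySem.Dict.getD_insert_of_ne _ _ _ hne]
          exact h r (List.mem_cons_of_mem _ hr)

theorem pvPayLoop_sum (L : List (Char × Int)) : ∀ (d d' : PySem.Dict Char Int),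
    (L.map Prod.fst).Nodup → d.keys.Nodup → pvPayLoop L d = some d' →
    (d'.items.map Prod.snd).sum = (d.items.map Prod.snd).sum - (L.map Prod.snd).sum := by
  induction L with
  | nil => intro d d' _ _ h; simp [pvPayLoop] at h; subst h; simp
  | cons q rest ih =>
    intro d d' hn hd h
    simp only [List.map_cons, List.nodup_cons] at hn
    cases hg : d.get? q.1 with
    | none => simp [pvPayLoop, hg] at h
    | some pv =>
      simp only [pvPayLoop, hg, PySem.Dict.getD_insert_self] at h
      by_cases hneg : pv - q.2 < 0
      · simp [hneg] at h
      · simp only [hneg, if_false] at h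
        have hd' : (d.insert q.1 (pv - q.2)).keys.Nodup := PySem.Dict.nodup_keys_insert _ _ _ hd
        have := ih _ _ hn.2 hd' h
        rw [this, pv_sum_insert d q.1 pv (pv - q.2) hd hg]
        simp only [List.map_cons, List.sum_cons]
        ring

theorem pv_count_filter (s : List Char) (m : Char) (hm : m ∈ pvMAGES) :
    List.count m (s.filter (fun c => decide (c ∈ pvMAGES))) = List.count m s :=
  List.count_filter (by simpa using hm)

theorem pv_cond_iff (lp lc : List Char) :
    (∀ q ∈ (PySem.Dict.counter (lc.filter (fun c => decide (c ∈ pvMAGES)))).items,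
        q.2 ≤ (PySem.Dict.counter (lp.filter (fun c => decide (c ∈ pvMAGES)))).getD q.1 0)
    ↔ ∀ m ∈ pvMAGES, PySem.List.count lc m ≤ PySem.List.count lp m := by
  constructor
  · intro h m hm
    rw [PySem.List.count_eq, PySem.List.count_eq]
    rcases Nat.eq_zero_or_pos (List.count m lc) with h0 | h0
    · omega
    · have hmem : m ∈ lc.filter (fun c => decide (c ∈ pvMAGES)) := by
        rw [List.mem_filter]
        exact ⟨List.count_pos_iff.mp h0, by simpa using hm⟩
      have hq : (m, (List.count m (lc.filter (fun c => decide (c ∈ pvMAGES))) : Int)) ∈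
          (PySem.Dict.counter (lc.filter (fun c => decide (c ∈ pvMAGES)))).items := by
        rw [PySem.Dict.items_counter]
        exact List.mem_map_of_mem ((PySem.Set.mem_ofList _ _).mpr hmem)
      have := h _ hq
      rw [PySem.Dict.getD_counter] at this
      simp only [pv_count_filter _ _ hm] at this
      exact_mod_cast this
  · intro h q hq
    rw [PySem.Dict.items_counter] at hq
    obtain ⟨k, hk, rfl⟩ := List.mem_map.mp hq
    have hkf : k ∈ lc.filter (fun c => decide (c ∈ pvMAGES)) := (PySem.Set.mem_ofList _ _).mp hk
    have hkm : k ∈ pvMAGES := by simpa using (List.mem_filter.mp hkf).2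
    rw [PySem.Dict.getD_counter]
    have := h k hkm
    rw [PySem.List.count_eq, PySem.List.count_eq] at this
    simp only [pv_count_filter _ _ hkm]
    exact_mod_cast this

theorem pv_counter_sum (s : List Char) :
    (List.map Prod.snd (PySem.Dict.counter (s.filter (fun c => decide (c ∈ pvMAGES)))).items).sum
      = (pvMAGES.map (fun m => (PySem.List.count s m : Int))).sum := by
  rw [PySem.Dict.items_counter, List.map_map]
  set fs := s.filter (fun c => decide (c ∈ pvMAGES)) with hfs
  have hcong : ∀ k ∈ PySem.Set.ofList fs,
      (Prod.snd ∘ fun k => (k, (List.count k fs : Int))) k = (fun m => (PySem.List.count s m : Int)) k := by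
    intro k hk
    have hkf : k ∈ fs := (PySem.Set.mem_ofList _ _).mp hk
    have hkm : k ∈ pvMAGES := by simpa using (List.mem_filter.mp hkf).2
    simp only [Function.comp_apply, PySem.List.count_eq, hfs, pv_count_filter _ _ hkm]
  rw [List.map_congr_left hcong]
  have hnds : (PySem.Set.ofList fs).Nodup := PySem.Set.nodup_ofList fs
  have hndm : pvMAGES.Nodup := by decide
  rw [← List.sum_toFinset _ hnds, ← List.sum_toFinset _ hndm]
  apply Finset.sum_subset
  · intro m hmem
    rw [List.mem_toFinset] at hmem ⊢
    have hkf : m ∈ fs := (PySem.Set.mem_ofList _ _).mp hmem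
    simpa using (List.mem_filter.mp hkf).2
  · intro m hm hnm
    rw [List.mem_toFinset] at hm hnm
    have : ¬ m ∈ fs := fun hf => hnm ((PySem.Set.mem_ofList _ _).mpr hf)
    have h0 : List.count m s = 0 := by
      by_contra hc
      exact this (List.mem_filter.mpr ⟨List.count_pos_iff.mp (Nat.pos_of_ne_zero hc), by simpa using hm⟩)
    simp [PySem.List.count_eq, h0]

-- ===== A = closed form =====
theorem pv_A_closed (pm mc : String) : can_pay_cost pm mc = pvClosed pm mc := by
  simp only [can_pay_cost, pvClosed]
  rw [pvScan_eq_counter pm.toList, pvScan_eq_counter mc.toList, pvScan_snd pm.toList, pvScan_snd mc.toList]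
  set fp := pm.toList.filter (fun c => decide (c ∈ pvMAGES)) with hfp
  set fc := mc.toList.filter (fun c => decide (c ∈ pvMAGES)) with hfc
  have hnodc : ((PySem.Dict.counter fc).items.map Prod.fst).Nodup := PySem.Dict.nodup_keys_counter fc
  have hnodp : (PySem.Dict.counter fp).keys.Nodup := PySem.Dict.nodup_keys_counter fp
  have hv : ∀ q ∈ (PySem.Dict.counter fc).items, (1 : Int) ≤ q.2 := by
    intro q hq
    rw [PySem.Dict.items_counter] at hq
    obtain ⟨k, hk, rfl⟩ := List.mem_map.mp hq
    have : k ∈ fc := (PySem.Set.mem_ofList _ _).mp hk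
    have h0 : 0 < List.count k fc := List.count_pos_iff.mpr this
    show (1 : Int) ≤ (List.count k fc : Int)
    exact_mod_cast h0
  have hiff := pvPayLoop_isSome (PySem.Dict.counter fc).items (PySem.Dict.counter fp) hnodc hnodp hv
  have hci := pv_cond_iff pm.toList mc.toList
  rw [← hfp, ← hfc] at hci
  by_cases hC : ∀ q ∈ (PySem.Dict.counter fc).items, q.2 ≤ (PySem.Dict.counter fp).getD q.1 0
  · obtain ⟨d', hd'⟩ := Option.isSome_iff_exists.mp (hiff.mpr hC)
    rw [hd']
    have hguard : (pvMAGES.any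
        (fun m => PySem.List.count mc.toList m > PySem.List.count pm.toList m)) = false := by
      rw [List.any_eq_false]
      intro m hm
      have h2 := hci.mp hC m hm
      simp only [gt_iff_lt, decide_eq_true_eq]
      omega
    rw [hguard]
    simp only [Bool.false_eq_true, if_false]
    have hsum := pvPayLoop_sum (PySem.Dict.counter fc).items (PySem.Dict.counter fp) d' hnodc hnodp hd'
    rw [PySem.List.foldl_add d'.items (fun q => q.2) (pvLastDigit pm.toList), hsum]
    have hsp := pv_counter_sum pm.toList
    rw [← hfp] at hsp
    have hsc := pv_counter_sum mc.toList
    rw [← hfc] at hsc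
    rw [hsp, hsc]
    by_cases hlt : pvLastDigit pm.toList +
        ((pvMAGES.map (fun m => (PySem.List.count pm.toList m : Int))).sum -
          (pvMAGES.map (fun m => (PySem.List.count mc.toList m : Int))).sum) - pvLastDigit mc.toList < 0
    · rw [if_pos hlt]
      symm
      simp only [decide_eq_false_iff_not, ge_iff_le, not_le]
      omega
    · rw [if_neg hlt]
      symm
      simp only [decide_eq_true_eq, ge_iff_le]
      omega
  · have hnone : pvPayLoop (PySem.Dict.counter fc).items (PySem.Dict.counter fp) = none := by
      rcases h : pvPayLoop (PySem.Dict.counter fc).items (PySem.Dict.counter fp) with _ | d'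
      · rfl
      · exact absurd (hiff.mp (by rw [h]; rfl)) hC
    rw [hnone]
    have hguard : (pvMAGES.any
        (fun m => PySem.List.count mc.toList m > PySem.List.count pm.toList m)) = true := by
      rcases Bool.eq_false_or_eq_true (pvMAGES.any
        (fun m => PySem.List.count mc.toList m > PySem.List.count pm.toList m)) with h | h
      · exact h
      · exfalso
        apply hC
        apply hci.mpr
        intro m hm
        have h2 := List.any_eq_false.mp h m hm
        simp only [gt_iff_lt, decide_eq_true_eq] at h2
        omega
    rw [hguard]
    simp

-- ===== B-side lemmas =====
theorem pv_generic_eq (l : List Char) : ∀ (a : Int),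
    l.foldl (fun g c => if PySem.Chars.isdigit c then pvDigitVal c else g) a
      = ((l.reverse.find? PySem.Chars.isdigit).map pvDigitVal).getD a := by
  induction l with
  | nil => intro a; simp
  | cons c l ih =>
    intro a
    simp only [List.foldl_cons, List.reverse_cons, List.find?_append, ih]
    by_cases hd : PySem.Chars.isdigit c = true
    · cases hf : l.reverse.find? PySem.Chars.isdigit with
      | some x => simp
      | none => simp [hd]
    · cases hf : l.reverse.find? PySem.Chars.isdigit with
      | some x => simp
      | none => simp [hd]

theorem pvPayRec_isSome : ∀ (l pool : List Char) (need : Int),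
    (pvPayRec l pool need).isSome = true
      ↔ ∀ m, List.count m (l.filter (fun c => decide (c ∈ pvMAGES))) ≤ List.count m pool := by
  intro l
  induction l with
  | nil => intro pool need; simp [pvPayRec]
  | cons c l ih =>
    intro pool need
    by_cases hm : c ∈ pvMAGES
    · have hfc : (c :: l).filter (fun c => decide (c ∈ pvMAGES))
          = c :: l.filter (fun c => decide (c ∈ pvMAGES)) := by simp [hm]
      by_cases hp : c ∈ pool
      · simp only [pvPayRec, hm, if_true, PySem.List.remove?_eq_some_erase pool c hp, hfc]
        rw [ih]
        constructor
        · intro h m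
          have h2 := h m
          rw [List.count_erase] at h2
          rw [List.count_cons]
          have hc1 : 1 ≤ List.count c pool := List.count_pos_iff.mpr hp
          by_cases hcm : c = m
          · subst hcm
            simp at h2 ⊢
            omega
          · have hb : (c == m) = false := beq_false_of_ne hcm
            simp [hb] at h2 ⊢
            omega
        · intro h m
          have h2 := h m
          rw [List.count_cons] at h2
          rw [List.count_erase]
          by_cases hcm : c = m
          · subst hcm
            simp at h2 ⊢
            omega
          · have hb : (c == m) = false := beq_false_of_ne hcm
            simp [hb] at h2 ⊢
            omega
      · have hrn : PySem.List.remove? pool c = none := (PySem.List.remove?_eq_none_iff pool c).mpr hp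
        simp only [pvPayRec, hm, if_true, hrn, hfc]
        constructor
        · intro h; simp at h
        · intro h
          have := h c
          rw [List.count_cons_self] at this
          have h0 : List.count c pool = 0 := List.count_eq_zero.mpr hp
          omega
    · have hfc : (c :: l).filter (fun c => decide (c ∈ pvMAGES))
          = l.filter (fun c => decide (c ∈ pvMAGES)) := by simp [hm]
      by_cases hd : PySem.Chars.isdigit c = true
      · simp only [pvPayRec, hm, if_false, hd, if_true, hfc]; exact ih pool _
      · simp only [pvPayRec, hm, if_false, hd, hfc]; exact ih pool need

theorem pvPayRec_some : ∀ (l pool : List Char) (need : Int) (pool' : List Char) (need' : Int),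
    pvPayRec l pool need = some (pool', need') →
    pool'.length + (l.filter (fun c => decide (c ∈ pvMAGES))).length = pool.length
    ∧ need' = ((l.reverse.find? PySem.Chars.isdigit).map pvDigitVal).getD need := by
  intro l
  induction l with
  | nil =>
    intro pool need pool' need' h
    simp [pvPayRec] at h
    simp [h.1, h.2]
  | cons c l ih =>
    intro pool need pool' need' h
    simp only [List.reverse_cons, List.find?_append]
    by_cases hm : c ∈ pvMAGES
    · have hfc : (c :: l).filter (fun c => decide (c ∈ pvMAGES))
          = c :: l.filter (fun c => decide (c ∈ pvMAGES)) := by simp [hm]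
      simp only [pvPayRec, hm, if_true] at h
      cases hr : PySem.List.remove? pool c with
      | none => rw [hr] at h; simp at h
      | some p2 =>
        rw [hr] at h
        have hp : c ∈ pool := by
          by_contra hp
          rw [(PySem.List.remove?_eq_none_iff pool c).mpr hp] at hr; simp at hr
        have hp2 : p2 = pool.erase c := by
          rw [PySem.List.remove?_eq_some_erase pool c hp] at hr
          exact (Option.some.injEq _ _ ▸ hr.symm : _)
        obtain ⟨h1, h2⟩ := ih p2 need pool' need' h
        have hlen : p2.length + 1 = pool.length := by
          rw [hp2, List.length_erase_of_mem hp]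
          have : 1 ≤ pool.length := List.length_pos_of_mem hp
          omega
        constructor
        · rw [hfc]; simp only [List.length_cons]; omega
        · rw [h2]
          cases hf : l.reverse.find? PySem.Chars.isdigit with
          | some x => simp
          | none => simp [pv_mages_not_digit c hm]
    · by_cases hd : PySem.Chars.isdigit c = true
      · have hfc : (c :: l).filter (fun c => decide (c ∈ pvMAGES))
            = l.filter (fun c => decide (c ∈ pvMAGES)) := by simp [hm]
        simp only [pvPayRec, hm, if_false, hd, if_true] at h
        obtain ⟨h1, h2⟩ := ih pool (pvDigitVal c) pool' need' h
        refine ⟨by rw [hfc]; exact h1, ?_⟩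
        rw [h2]
        cases hf : l.reverse.find? PySem.Chars.isdigit with
        | some x => simp
        | none => simp [hd]
      · have hfc : (c :: l).filter (fun c => decide (c ∈ pvMAGES))
            = l.filter (fun c => decide (c ∈ pvMAGES)) := by simp [hm]
        simp only [pvPayRec, hm, if_false, hd] at h
        obtain ⟨h1, h2⟩ := ih pool need pool' need' h
        refine ⟨by rw [hfc]; exact h1, ?_⟩
        rw [h2]
        cases hf : l.reverse.find? PySem.Chars.isdigit with
        | some x => simp
        | none => simp [hd]

theorem pv_filter_cov (lp lc : List Char) :
    (∀ m, List.count m (lc.filter (fun c => decide (c ∈ pvMAGES)))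
        ≤ List.count m (lp.filter (fun c => decide (c ∈ pvMAGES))))
    ↔ ∀ m ∈ pvMAGES, PySem.List.count lc m ≤ PySem.List.count lp m := by
  constructor
  · intro h m hm
    have := h m
    rw [pv_count_filter lc m hm, pv_count_filter lp m hm] at this
    rw [PySem.List.count_eq, PySem.List.count_eq]
    exact this
  · intro h m
    by_cases hm : m ∈ pvMAGES
    · rw [pv_count_filter lc m hm, pv_count_filter lp m hm]
      have := h m hm
      rw [PySem.List.count_eq, PySem.List.count_eq] at this
      exact this
    · have h0 : List.count m (lc.filter (fun c => decide (c ∈ pvMAGES))) = 0 := by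
        rw [List.count_eq_zero]
        intro hmem
        exact hm (by simpa using (List.mem_filter.mp hmem).2)
      omega

theorem pv_filter_len (s : List Char) :
    ((s.filter (fun c => decide (c ∈ pvMAGES))).length : Int)
      = (pvMAGES.map (fun m => (PySem.List.count s m : Int))).sum := by
  induction s with
  | nil => decide
  | cons c s ih =>
    by_cases hm : c ∈ pvMAGES
    · have hfc : (c :: s).filter (fun c => decide (c ∈ pvMAGES))
          = c :: s.filter (fun c => decide (c ∈ pvMAGES)) := by simp [hm]
      rw [hfc]
      simp only [List.length_cons, pvMAGES, List.map_cons, List.map_nil, List.sum_cons,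
        List.sum_nil, PySem.List.count_eq, List.count_cons] at ih ⊢
      push_cast
      rw [ih]
      fin_cases hm <;> simp <;> ring
    · have hfc : (c :: s).filter (fun c => decide (c ∈ pvMAGES))
          = s.filter (fun c => decide (c ∈ pvMAGES)) := by simp [hm]
      rw [hfc, ih]
      simp only [pvMAGES, List.mem_cons, List.not_mem_nil, or_false, not_or] at hm
      obtain ⟨h1, h2, h3, h4, h5, h6⟩ := hm
      simp [pvMAGES, PySem.List.count_eq, List.count_cons, h1, h2, h3, h4, h5, h6]

-- ===== B = closed form =====
theorem pv_B_closed (pm mc : String) : can_pay_cost_alt pm mc = pvClosed pm mc := by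
  simp only [can_pay_cost_alt, pvClosed]
  set fp := pm.toList.filter (fun c => decide (c ∈ pvMAGES)) with hfp
  set fc := mc.toList.filter (fun c => decide (c ∈ pvMAGES)) with hfc
  have hgen : pvGenericOf pm.toList = pvLastDigit pm.toList := by
    rw [pvGenericOf, pv_generic_eq, pvLastDigit]
  cases hr : pvPayRec mc.toList fp 0 with
  | none =>
    have hns : ¬ ∀ m, List.count m fc ≤ List.count m fp := by
      intro h
      have := (pvPayRec_isSome mc.toList fp 0).mpr h
      rw [hr] at this; simp at this
    have hguard : (pvMAGES.any
        (fun m => PySem.List.count mc.toList m > PySem.List.count pm.toList m)) = true := by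
      rcases Bool.eq_false_or_eq_true (pvMAGES.any
        (fun m => PySem.List.count mc.toList m > PySem.List.count pm.toList m)) with h | h
      · exact h
      · exfalso
        apply hns
        apply (pv_filter_cov pm.toList mc.toList).mpr
        intro m hm
        have h2 := List.any_eq_false.mp h m hm
        simp only [gt_iff_lt, decide_eq_true_eq] at h2
        omega
    rw [hguard]
    simp
  | some pr =>
    obtain ⟨pool', need⟩ := pr
    have hsome : ∀ m, List.count m fc ≤ List.count m fp := by
      have := (pvPayRec_isSome mc.toList fp 0).mp (by rw [hr]; rfl)
      exact this
    have hguard : (pvMAGES.any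
        (fun m => PySem.List.count mc.toList m > PySem.List.count pm.toList m)) = false := by
      rw [List.any_eq_false]
      intro m hm
      have h2 := (pv_filter_cov pm.toList mc.toList).mp hsome m hm
      simp only [gt_iff_lt, decide_eq_true_eq]
      omega
    rw [hguard]
    simp only [Bool.false_eq_true, if_false]
    obtain ⟨hlen, hneed⟩ := pvPayRec_some mc.toList fp 0 pool' need hr
    rw [← hfc] at hlen
    have hneed' : need = pvLastDigit mc.toList := by rw [hneed, pvLastDigit]
    have hplen : (pool'.length : Int)
        = (pvMAGES.map (fun m => (PySem.List.count pm.toList m : Int))).sum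
          - (pvMAGES.map (fun m => (PySem.List.count mc.toList m : Int))).sum := by
      have h1 := pv_filter_len pm.toList
      have h2 := pv_filter_len mc.toList
      rw [← hfp] at h1; rw [← hfc] at h2
      omega
    rw [hgen, hneed', hplen]
    by_cases hge : pvLastDigit pm.toList
        + ((pvMAGES.map (fun m => (PySem.List.count pm.toList m : Int))).sum
          - (pvMAGES.map (fun m => (PySem.List.count mc.toList m : Int))).sum)
        ≥ pvLastDigit mc.toList
    · rw [decide_eq_true hge]
      symm
      simp only [decide_eq_true_eq, ge_iff_le]
      omega
    · rw [decide_eq_false hge]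
      symm
      simp only [decide_eq_false_iff_not, ge_iff_le]
      omega

-- ===== VERDICT (by name: the statement is the Claim_ definition above) =====
theorem can_pay_cost_spec : Claim_equal_can_pay_cost := by
  intro pm mc _
  unfold Spec_can_pay_cost
  rw [pv_A_closed, pv_B_closed]
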